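-- pv_equiv track=rewrite | github.com/banana-galaxy/challenges | challenge17(backOnTime)/solutions/Iceman.py | solution
-- ===== SOURCE A (Python) =====
-- def solution(directions: list) -> bool:
--     cords: list = [0, 0]
--     cord_update: dict = {
--         'n': lambda cords: [cords[0], cords[1]+1],
--         'e': lambda cords: [cords[0]+1, cords[1]],
--         's': lambda cords: [cords[0], cords[1]-1],
--         'w': lambda cords: [cords[0]-1, cords[1]],
--     }  # this whole dict is 1 lines of code ?
--     for direction in directions:
--         cords = cord_update[direction](cords)
--     return True if cords==[0, 0] else False
-- ===== SOURCE B (Python) =====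
-- def solution(directions: list) -> bool:
--     counts: dict = {'n': 0, 'e': 0, 's': 0, 'w': 0}
--     for direction in directions:
--         counts[direction] += 1
--     return counts['n'] == counts['s'] and counts['e'] == counts['w']
-- ===== Notes on version B (the rewrite author's own statement) =====
-- stated objective: alternative
-- what changed: B replaces the coordinate simulation (dict of lambdas updating an [x,y] pair) with a plain tally dict counting each direction once, then compares the n/s and e/w tallies; Pre_ excludes lists with a direction outside n/e/s/w, on which both programs raise KeyError.
import Mathlib
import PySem

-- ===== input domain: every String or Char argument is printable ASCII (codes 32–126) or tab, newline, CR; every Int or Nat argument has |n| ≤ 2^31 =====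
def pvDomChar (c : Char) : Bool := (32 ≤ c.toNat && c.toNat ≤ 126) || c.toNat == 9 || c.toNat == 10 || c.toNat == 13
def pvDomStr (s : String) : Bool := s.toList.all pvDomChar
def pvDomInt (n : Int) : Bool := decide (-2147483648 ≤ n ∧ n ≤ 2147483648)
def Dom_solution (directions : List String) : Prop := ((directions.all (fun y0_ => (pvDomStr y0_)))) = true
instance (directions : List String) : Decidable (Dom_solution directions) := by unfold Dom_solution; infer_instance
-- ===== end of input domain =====

-- B replaces A's coordinate simulation with a tally dict of direction counts, compared pairwise at the end.


-- ===== PORT A =====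
-- cord_update[direction] raises KeyError on an unknown key: modelled by the Option state (none = KeyError).
def solStepA (c : Option (Int × Int)) (d : String) : Option (Int × Int) :=
  match c with
  | none => none
  | some (x, y) =>
    if d == "n" then some (x, y + 1)
    else if d == "e" then some (x + 1, y)
    else if d == "s" then some (x, y - 1)
    else if d == "w" then some (x - 1, y)
    else none

def solution (directions : List String) : Bool :=
  match directions.foldl solStepA (some (0, 0)) with
  | some cords => cords == (0, 0)
  | none => false   -- unreachable under Pre_solution (Python raises KeyError here)

-- ===== PORT B =====
-- counts[direction] += 1 raises KeyError on an unknown key: modelled by the Option state (none = KeyError).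
def solStepB (c : Option (PySem.Dict String Int)) (d : String) : Option (PySem.Dict String Int) :=
  match c with
  | none => none
  | some m =>
    match m.get? d with
    | none => none
    | some v => some (m.insert d (v + 1))

def solCounts0 : PySem.Dict String Int :=
  PySem.Dict.ofList [("n", 0), ("e", 0), ("s", 0), ("w", 0)]

def solution_alt (directions : List String) : Bool :=
  match directions.foldl solStepB (some solCounts0) with
  | some m => (m.getD "n" 0 == m.getD "s" 0) && (m.getD "e" 0 == m.getD "w" 0)
  | none => false  -- unreachable under Pre_solution (Python raises KeyError here); the four final lookups always find their seeded keys

-- ===== PRECONDITION & SPEC =====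
-- Pre_ excludes exactly the inputs on which A's dict lookup raises KeyError (an unknown direction string).
def Pre_solution (directions : List String) : Prop :=
  ∀ d ∈ directions, d = "n" ∨ d = "e" ∨ d = "s" ∨ d = "w"
instance (directions : List String) : Decidable (Pre_solution directions) := by
  unfold Pre_solution; infer_instance
def pvWitness_solution : List String := ["n", "e", "s", "w"]

def Spec_solution (directions : List String) (out : Bool) : Prop := out = solution_alt directions
instance (directions : List String) (out : Bool) : Decidable (Spec_solution directions out) := by unfold Spec_solution; infer_instance

-- ===== CLAIM (what is proved, stated in full; the proofs are below) =====
def Claim_equal_solution : Prop := ∀ (directions : List String), Dom_solution directions → Pre_solution directions → Spec_solution directions (solution directions)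

-- ===== LEMMAS AND PROOFS =====
lemma solStepA_n (x y : Int) : solStepA (some (x, y)) "n" = some (x, y + 1) := by simp [solStepA]
lemma solStepA_e (x y : Int) : solStepA (some (x, y)) "e" = some (x + 1, y) := by simp [solStepA]
lemma solStepA_s (x y : Int) : solStepA (some (x, y)) "s" = some (x, y - 1) := by simp [solStepA]
lemma solStepA_w (x y : Int) : solStepA (some (x, y)) "w" = some (x - 1, y) := by simp [solStepA]

lemma solFoldA (l : List String) (x y : Int)
    (h : ∀ d ∈ l, d = "n" ∨ d = "e" ∨ d = "s" ∨ d = "w") :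
    l.foldl solStepA (some (x, y)) =
      some (x + (l.count "e" : Int) - (l.count "w" : Int),
            y + (l.count "n" : Int) - (l.count "s" : Int)) := by
  induction l generalizing x y with
  | nil => simp
  | cons d t ih =>
    have hd := h d (List.mem_cons_self ..)
    have ht : ∀ e ∈ t, e = "n" ∨ e = "e" ∨ e = "s" ∨ e = "w" :=
      fun e he => h e (List.mem_cons_of_mem _ he)
    rcases hd with h1 | h1 | h1 | h1 <;> subst h1 <;>
      simp only [List.foldl_cons, solStepA_n, solStepA_e, solStepA_s, solStepA_w] <;>
      rw [ih _ _ ht] <;> simp <;> omega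

lemma solFoldB (l : List String) (m : PySem.Dict String Int)
    (hm : ∀ k ∈ (["n", "e", "s", "w"] : List String), m.contains k = true)
    (h : ∀ d ∈ l, d = "n" ∨ d = "e" ∨ d = "s" ∨ d = "w") :
    ∃ m', l.foldl solStepB (some m) = some m' ∧
      ∀ k ∈ (["n", "e", "s", "w"] : List String),
        m'.getD k 0 = m.getD k 0 + (l.count k : Int) := by
  induction l generalizing m with
  | nil => exact ⟨m, rfl, by simp⟩
  | cons d t ih =>
    have hd : d ∈ (["n", "e", "s", "w"] : List String) := by
      rcases h d (List.mem_cons_self ..) with h1 | h1 | h1 | h1 <;> simp [h1]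
    have ht : ∀ e ∈ t, e = "n" ∨ e = "e" ∨ e = "s" ∨ e = "w" :=
      fun e he => h e (List.mem_cons_of_mem _ he)
    have hsome : (m.get? d).isSome := by
      rw [← PySem.Dict.contains_eq_isSome_get?]; exact hm d hd
    obtain ⟨v, hv⟩ := Option.isSome_iff_exists.mp hsome
    have hm' : ∀ k ∈ (["n", "e", "s", "w"] : List String),
        (m.insert d (v + 1)).contains k = true := by
      intro k hk
      rw [PySem.Dict.contains_insert, hm k hk, Bool.or_true]
    obtain ⟨m', hfold, hcnt⟩ := ih (m.insert d (v + 1)) hm' ht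
    refine ⟨m', ?_, ?_⟩
    · simp only [List.foldl_cons, solStepB, hv, hfold]
    · intro k hk
      rw [hcnt k hk, PySem.Dict.getD_insert, List.count_cons]
      by_cases hkd : k = d
      · subst hkd
        rw [if_pos rfl, PySem.Dict.getD_eq_get?_getD, hv]
        simp
        omega
      · have hdk : ¬d = k := fun hh => hkd hh.symm
        simp [hkd, hdk]

theorem solution_spec : Claim_equal_solution := by
  intro directions _ hpre
  obtain ⟨m', hfold, hcnt⟩ := solFoldB directions solCounts0 (by decide) hpre
  have hn := hcnt "n" (by decide)
  have he := hcnt "e" (by decide)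
  have hs := hcnt "s" (by decide)
  have hw := hcnt "w" (by decide)
  have h0 : ∀ k ∈ (["n", "e", "s", "w"] : List String), solCounts0.getD k 0 = 0 := by decide
  rw [h0 "n" (by decide)] at hn; rw [h0 "e" (by decide)] at he
  rw [h0 "s" (by decide)] at hs; rw [h0 "w" (by decide)] at hw
  unfold Spec_solution solution solution_alt
  rw [solFoldA directions 0 0 hpre, hfold]
  simp only [hn, he, hs, hw]
  rw [Bool.eq_iff_iff]
  simp
  omega
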